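-- pv_equiv track=rewrite | github.com/slrkajsep337/algorithm-Python | src/programmers/PCCP/1-1.py | solution
-- ===== SOURCE A (Python) =====
-- def solution(input_string):
--     answer = ''
--
--     for i in range(len(input_string)):
--         pivot = input_string[i]
--         cnt = input_string.count(pivot)
--         for j in range(i, len(input_string)):
--             if pivot == '0': break
--             if input_string[j] != pivot and cnt !=0 :
--                 answer += pivot
--                 break
--             elif input_string[j] == pivot:
--                 cnt -= 1
--                 if cnt == 0: break
--         input_string = input_string.replace(pivot, '0')
--
--     temp = sorted(answer)
--     answer = ''
--     for i in temp:
--         answer += i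
--
--     if answer == '': return "N"
--
--     return answer
-- ===== SOURCE B (Python) =====
-- def solution(input_string):
--     stats = {}
--     for idx, ch in enumerate(input_string):
--         if ch in stats:
--             first, last, cnt = stats[ch]
--             stats[ch] = (first, idx, cnt + 1)
--         else:
--             stats[ch] = (idx, idx, 1)
--     result = sorted(ch for ch, (first, last, cnt) in stats.items()
--                     if ch != '0' and last - first + 1 != cnt)
--     return ''.join(result) if result else "N"
-- ===== Notes on version B (the rewrite author's own statement) =====
-- stated objective: faster
-- what changed: A repeatedly scans the whole string per character (count, inner scan, replace) which is quadratic; B makes one pass recording (first index, last index, count) per character in a dict and reports a character as non-contiguous iff last - first + 1 != count, then sorts the qualifying characters.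
import Mathlib
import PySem

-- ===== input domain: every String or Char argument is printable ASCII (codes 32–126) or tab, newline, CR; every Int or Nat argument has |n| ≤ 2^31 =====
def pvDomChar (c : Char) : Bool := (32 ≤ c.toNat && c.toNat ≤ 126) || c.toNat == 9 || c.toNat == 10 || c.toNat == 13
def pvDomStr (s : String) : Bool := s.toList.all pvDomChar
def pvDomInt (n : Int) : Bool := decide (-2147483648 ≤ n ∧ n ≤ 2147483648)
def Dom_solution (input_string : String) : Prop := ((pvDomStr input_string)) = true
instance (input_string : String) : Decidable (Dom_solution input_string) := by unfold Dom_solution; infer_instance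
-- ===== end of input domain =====

-- B replaces A's per-character whole-string count/scan/replace passes by ONE pass recording
-- (first index, last index, count) per character: occurrences are contiguous iff
-- last - first + 1 = count.  A never reports the character '0' (its marker for processed
-- positions); B keeps that exclusion as one filter.  Result sorted, "N" if empty.

-- ===== PORT A =====
-- inner loop 'for j in range(i, len(input_string))' reading input_string[j] sequentially:
-- ported as a walk down the suffix input_string[i:] (the same reads in the same order)
def solutionInner (p : Char) : Int → List Char → Bool
  | _, [] => false
  | cnt, c :: rest =>
    if p = '0' then false
    else if c ≠ p ∧ cnt ≠ 0 then true
    else if c = p then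
      (if cnt - 1 = 0 then false else solutionInner p (cnt - 1) rest)
    else solutionInner p cnt rest

-- outer loop 'for i in range(len(input_string))'; m is the current (mutated) string,
-- acc the answer built so far.  m.getD i ' ' is input_string[i] (every i < length here).
def solutionOuter : List Char → List Nat → List Char → List Char
  | _, [], acc => acc
  | m, i :: is, acc =>
    let p := m.getD i ' '
    let cnt : Int := (m.count p : Int)
    let acc' := if solutionInner p cnt (m.drop i) then acc ++ [p] else acc
    solutionOuter (m.map fun c => if c = p then '0' else c) is acc'

def solution (input_string : String) : String :=
  let s := input_string.toList
  let acc := solutionOuter s (List.range s.length) []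
  let temp := PySem.List.sorted acc (fun c => c) false
  let answer := temp.foldl (fun (a : List Char) c => a ++ [c]) []
  if answer = [] then "N" else String.mk answer

-- ===== PORT B =====
-- one pass: stats[ch] = (first index, last index, count)
def solutionAltStep (d : PySem.Dict Char (Int × Int × Int)) (p : Int × Char) :
    PySem.Dict Char (Int × Int × Int) :=
  match d.get? p.2 with
  | some (first, _, cnt) => d.insert p.2 (first, p.1, cnt + 1)
  | none => d.insert p.2 (p.1, p.1, 1)

def solution_alt (input_string : String) : String :=
  let s := input_string.toList
  let stats := (PySem.List.enumerate s).foldl solutionAltStep PySem.Dict.empty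
  let result := PySem.List.sorted
    ((stats.items.filter (fun q => decide (q.1 ≠ '0' ∧ q.2.2.1 - q.2.1 + 1 ≠ q.2.2.2))).map (·.1))
    (fun c => c) false
  if result = [] then "N" else String.mk result

-- ===== PRECONDITION & SPEC =====
def Spec_solution (input_string : String) (out : String) : Prop := out = solution_alt input_string
instance (input_string : String) (out : String) : Decidable (Spec_solution input_string out) := by unfold Spec_solution; infer_instance

-- ===== CLAIM (what is proved, stated in full; the proofs are below) =====
def Claim_equal_solution : Prop := ∀ (input_string : String), Dom_solution input_string → Spec_solution input_string (solution input_string)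

-- ===== LEMMAS AND PROOFS =====

-- the masked string A maintains: every already-processed character replaced by '0'
def pvMask (S : List Char) (c : Char) : Char := if c ∈ S then '0' else c

-- last index of c in s (characterised by pvLst_getElem / pvLst_max below)
def pvLst (s : List Char) (c : Char) : Nat := s.length - 1 - List.idxOf c s.reverse

-- the characters both programs collect, as a predicate on a character of s
def pvGood (s : List Char) (c : Char) : Bool :=
  decide (c ≠ '0' ∧ pvLst s c + 1 ≠ List.idxOf c s + s.count c)

-- the common intermediate value: distinct characters in order of first occurrence, filtered
def pvOut (s : List Char) : List Char := (PySem.Set.ofList s).filter (pvGood s)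

theorem pv_not_mem_take_idxOf {α : Type} [DecidableEq α] (a : α) (l : List α) :
    a ∉ l.take (List.idxOf a l) := by
  induction l with
  | nil => simp
  | cons b t ih =>
    by_cases h : b = a
    · subst h; simp [List.idxOf_cons_self]
    · rw [List.idxOf_cons_ne t h, List.take_succ_cons]
      simp only [List.mem_cons, not_or]
      exact ⟨fun hab => h hab.symm, ih⟩

theorem pv_idxOf_le {α : Type} [DecidableEq α] {l : List α} {a : α} {j : Nat}
    (hj : j < l.length) (h : l[j] = a) : List.idxOf a l ≤ j := by
  by_contra hc
  push_neg at hc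
  refine pv_not_mem_take_idxOf a l ?_
  subst h
  exact List.mem_take_iff_getElem.mpr ⟨j, by omega, rfl⟩

theorem pv_idxOf_eq {s : List Char} {p : Char} {i : Nat} (hi : i < s.length)
    (hp : s[i] = p) (hnot : p ∉ s.take i) : List.idxOf p s = i := by
  have hmem : p ∈ s := hp ▸ List.getElem_mem hi
  have hlt := List.idxOf_lt_length_of_mem hmem
  refine le_antisymm (pv_idxOf_le hi hp) ?_
  by_contra hc
  push_neg at hc
  exact hnot (List.mem_take_iff_getElem.mpr ⟨List.idxOf p s, by omega, List.getElem_idxOf _⟩)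

theorem pvLst_lt {s : List Char} {p : Char} (h : p ∈ s) : pvLst s p < s.length := by
  have := List.idxOf_lt_length_of_mem (List.mem_reverse.mpr h)
  unfold pvLst
  simp at this ⊢
  omega

theorem pvLst_getElem {s : List Char} {p : Char} (h : p ∈ s) :
    s[pvLst s p]'(pvLst_lt h) = p := by
  have hr := List.idxOf_lt_length_of_mem (List.mem_reverse.mpr h)
  have hg := List.getElem_idxOf hr
  rw [List.getElem_reverse] at hg
  have hlen : s.reverse.length = s.length := List.length_reverse
  unfold pvLst
  exact hg

theorem pvLst_max {s : List Char} {p : Char} (h : p ∈ s) :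
    ∀ j, pvLst s p < j → (hj : j < s.length) → s[j] ≠ p := by
  intro j hgt hj heq
  have hr := List.idxOf_lt_length_of_mem (List.mem_reverse.mpr h)
  have hlen : s.reverse.length = s.length := List.length_reverse
  have hj1 : s.length - 1 - j < s.reverse.length := by omega
  have hrev : s.reverse[s.length - 1 - j]'hj1 = p := by
    rw [List.getElem_reverse]
    rw [show s[s.length - 1 - (s.length - 1 - j)]'(by omega) = s[j]'hj from
      getElem_congr rfl (by omega) _]
    exact heq
  have := pv_idxOf_le hj1 hrev
  unfold pvLst at hgt
  omega

theorem pv_idxOf_le_pvLst {s : List Char} {p : Char} (h : p ∈ s) :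
    List.idxOf p s ≤ pvLst s p := pv_idxOf_le (pvLst_lt h) (pvLst_getElem h)

-- the contiguity test A performs (all of the count-window equal) matches B's index formula
theorem pv_contig_iff {s : List Char} {p : Char} (h : p ∈ s) :
    (((s.drop (List.idxOf p s)).take (s.count p)).all (· == p) = true
      ↔ pvLst s p + 1 = List.idxOf p s + s.count p) := by
  have hF : List.idxOf p s < s.length := List.idxOf_lt_length_of_mem h
  have hFg : s[List.idxOf p s] = p := List.getElem_idxOf hF
  have hK1 : 0 < s.count p := List.count_pos_iff.mpr h
  have htake0 : (s.take (List.idxOf p s)).count p = 0 :=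
    List.count_eq_zero.mpr (pv_not_mem_take_idxOf p s)
  have hsplit : (s.take (List.idxOf p s)).count p + (s.drop (List.idxOf p s)).count p = s.count p := by
    rw [← List.count_append, List.take_append_drop]
  have hdropK : (s.drop (List.idxOf p s)).count p = s.count p := by omega
  have hKlen : s.count p ≤ s.length - List.idxOf p s := by
    calc s.count p = (s.drop (List.idxOf p s)).count p := hdropK.symm
    _ ≤ (s.drop (List.idxOf p s)).length := List.count_le_length
    _ = s.length - List.idxOf p s := by rw [List.length_drop]
  have hglen : ((s.drop (List.idxOf p s)).take (s.count p)).length = s.count p := by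
    rw [List.length_take, List.length_drop]; omega
  have hsplit2 : ((s.drop (List.idxOf p s)).take (s.count p)).count p
      + (s.drop (List.idxOf p s + s.count p)).count p = s.count p := by
    have hdd : ((s.drop (List.idxOf p s)).drop (s.count p)) = s.drop (List.idxOf p s + s.count p) := by
      rw [List.drop_drop]
    rw [← hdd, ← List.count_append, List.take_append_drop, hdropK]
  have hall : (((s.drop (List.idxOf p s)).take (s.count p)).all (· == p) = true)
      ↔ ((s.drop (List.idxOf p s)).take (s.count p)).count p = s.count p := by
    constructor
    · intro hA
      have hx : ∀ b ∈ (s.drop (List.idxOf p s)).take (s.count p), p = b :=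
        fun b hb => (beq_iff_eq.mp (List.all_eq_true.mp hA b hb)).symm
      rw [List.count_eq_length.mpr hx, hglen]
    · intro hC
      have hx := List.count_eq_length.mp (by rw [hC, hglen])
      exact List.all_eq_true.mpr fun b hb => beq_iff_eq.mpr (hx b hb).symm
  constructor
  · intro hA
    have hcg : ((s.drop (List.idxOf p s)).take (s.count p)).count p = s.count p := hall.mp hA
    have hrest0 : (s.drop (List.idxOf p s + s.count p)).count p = 0 := by omega
    have hnot : p ∉ s.drop (List.idxOf p s + s.count p) := List.count_eq_zero.mp hrest0
    have hLlt : pvLst s p < List.idxOf p s + s.count p := by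
      by_contra hc
      push_neg at hc
      refine hnot ?_
      have hlt : pvLst s p - (List.idxOf p s + s.count p) <
          (s.drop (List.idxOf p s + s.count p)).length := by
        rw [List.length_drop]; have := pvLst_lt h; omega
      have : (s.drop (List.idxOf p s + s.count p))[pvLst s p - (List.idxOf p s + s.count p)]'hlt
          = p := by
        rw [List.getElem_drop]
        rw [show s[List.idxOf p s + s.count p + (pvLst s p - (List.idxOf p s + s.count p))]'(by
              have := pvLst_lt h; omega) = s[pvLst s p]'(pvLst_lt h) from
          getElem_congr rfl (by omega) _]
        exact pvLst_getElem h
      exact List.mem_iff_getElem.mpr ⟨_, hlt, this⟩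
    have hend : s[List.idxOf p s + s.count p - 1]'(by omega) = p := by
      have hklt : s.count p - 1 < ((s.drop (List.idxOf p s)).take (s.count p)).length := by omega
      have hmem : ((s.drop (List.idxOf p s)).take (s.count p))[s.count p - 1]'hklt
          ∈ (s.drop (List.idxOf p s)).take (s.count p) := List.getElem_mem hklt
      have heqp := List.all_eq_true.mp hA _ hmem
      rw [beq_iff_eq] at heqp
      rw [List.getElem_take, List.getElem_drop] at heqp
      rw [show s[List.idxOf p s + s.count p - 1]'(by omega)
            = s[List.idxOf p s + (s.count p - 1)]'(by omega) from
        getElem_congr rfl (by omega) _]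
      exact heqp
    have hge : List.idxOf p s + s.count p - 1 ≤ pvLst s p := by
      by_contra hc
      push_neg at hc
      exact pvLst_max h _ hc (by omega) hend
    omega
  · intro hB
    have hnot : p ∉ s.drop (List.idxOf p s + s.count p) := by
      intro hmem
      obtain ⟨j, hj, hjp⟩ := List.mem_iff_getElem.mp hmem
      rw [List.getElem_drop] at hjp
      refine pvLst_max h (List.idxOf p s + s.count p + j) (by omega)
        (by rw [List.length_drop] at hj; omega) hjp
    have hrest0 : (s.drop (List.idxOf p s + s.count p)).count p = 0 := List.count_eq_zero.mpr hnot
    exact hall.mpr (by omega)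

-- A's inner loop scans the suffix: it reports p iff the first cnt entries are not all p
theorem pv_inner_spec (p : Char) (hp : p ≠ '0') :
    ∀ (l : List Char) (cnt : Int), 0 < cnt → cnt ≤ l.count p →
      solutionInner p cnt l = !((l.take cnt.toNat).all (· == p)) := by
  intro l
  induction l with
  | nil =>
    intro cnt h1 h2
    simp only [List.count_nil, Nat.cast_zero] at h2
    omega
  | cons c rest ih =>
    intro cnt h1 h2
    by_cases hcp : c = p
    · subst hcp
      have hcc : ((c :: rest).count c : Int) = (rest.count c : Int) + 1 := by
        rw [List.count_cons_self]; push_cast; ring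
      by_cases hc1 : cnt - 1 = 0
      · have hone : cnt = 1 := by omega
        subst hone
        simp [solutionInner, hp]
      · have hstep : solutionInner c cnt (c :: rest) = solutionInner c (cnt - 1) rest := by
          simp [solutionInner, hp, hc1]
        rw [hstep, ih (cnt - 1) (by omega) (by rw [hcc] at h2; omega)]
        have htn : cnt.toNat = (cnt - 1).toNat + 1 := by omega
        rw [htn, List.take_succ_cons]
        simp
    · have hne : (c == p) = false := by simp [hcp]
      have hstep : solutionInner p cnt (c :: rest) = true := by
        simp only [solutionInner]
        rw [if_neg hp, if_pos ⟨hcp, by omega⟩]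
      rw [hstep]
      have htn : cnt.toNat = (cnt.toNat - 1) + 1 := by omega
      rw [htn, List.take_succ_cons]
      simp [hne]

theorem pv_inner_zero : ∀ (cnt : Int) (l : List Char), solutionInner '0' cnt l = false := by
  intro cnt l
  cases l <;> simp [solutionInner]

theorem pvLst_append_self (s : List Char) (c : Char) : pvLst (s ++ [c]) c = s.length := by
  unfold pvLst
  simp [List.reverse_append, List.idxOf_cons_self]

theorem pvLst_append_ne (s : List Char) (c d : Char) (h : d ≠ c) :
    pvLst (s ++ [c]) d = pvLst s d := by
  unfold pvLst
  rw [List.reverse_append]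
  simp only [List.reverse_singleton, List.singleton_append,
    List.idxOf_cons_ne _ (fun hh => h hh.symm), List.length_append, List.length_singleton]
  omega

-- masking the processed character on top of the old mask is the extended mask
theorem pv_mask_step {S : List Char} {a : Char} (haS : a ∉ S) (ha0 : a ≠ '0') (c : Char) :
    (if pvMask S c = a then '0' else pvMask S c) = pvMask (a :: S) c := by
  unfold pvMask
  by_cases hm : c ∈ S
  · have h1 : c ≠ a := fun hh => haS (hh ▸ hm)
    have h2 : ('0' : Char) ≠ a := fun hh => ha0 hh.symm
    simp [hm, h1, h2]
  · by_cases hca : c = a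
    · subst hca; simp [hm]
    · simp [hm, hca]

-- replacing '0' by '0' does nothing; growing the mask set by a masked character changes nothing
theorem pv_mask_zero {S : List Char} {a : Char} (h : a ∈ S ∨ a = '0') (c : Char) :
    (if pvMask S c = '0' then '0' else pvMask S c) = pvMask (a :: S) c := by
  unfold pvMask
  by_cases hm : c ∈ S
  · simp [hm]
  · by_cases hca : c = a
    · subst hca
      have h0 : c = '0' := h.resolve_left hm
      subst h0
      simp [hm]
    · by_cases h0 : c = '0' <;> simp [hm, hca, h0]

-- masking never creates or destroys an occurrence of an unprocessed, non-'0' character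
theorem pv_mask_beq {S : List Char} {a : Char} (haS : a ∉ S) (ha0 : a ≠ '0') (c : Char) :
    (pvMask S c == a) = (c == a) := by
  unfold pvMask
  by_cases hm : c ∈ S
  · have h1 : c ≠ a := fun hh => haS (hh ▸ hm)
    have h2 : ('0' : Char) ≠ a := fun hh => ha0 hh.symm
    simp [hm, h1, h2]
  · simp [hm]

theorem pv_count_mask {S : List Char} {a : Char} (haS : a ∉ S) (ha0 : a ≠ '0')
    (l : List Char) : (l.map (pvMask S)).count a = l.count a := by
  rw [List.count_eq_countP, List.count_eq_countP, List.countP_map]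
  exact List.countP_congr (fun c _ => by simpa using pv_mask_beq haS ha0 c)

-- pushing one character into the exclusion set commutes with the 'first occurrences' filter
theorem pv_filter_tail (s S : List Char) (a : Char) (t : List Char) :
    (t.filter (fun c => c != a)).filter (fun c => !(decide (c ∈ S)) && pvGood s c)
      = t.filter (fun c => !(decide (c ∈ a :: S)) && pvGood s c) := by
  rw [List.filter_filter]
  refine List.filter_congr (fun c _ => ?_)
  by_cases h1 : c = a <;> by_cases h2 : c ∈ S <;> simp [h1, h2]

-- A's outer loop: invariant over the remaining indices
theorem pv_outer_spec (s : List Char) : ∀ (k i : Nat) (S acc : List Char), i + k = s.length →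
    (∀ c, c ∈ S ↔ c ∈ s.take i) →
    solutionOuter (s.map (pvMask S)) (List.range' i k) acc
      = acc ++ (PySem.Set.ofList (s.drop i)).filter (fun c => !(decide (c ∈ S)) && pvGood s c) := by
  intro k
  induction k with
  | zero =>
    intro i S acc hlen _
    have : i = s.length := by omega
    subst this
    simp [solutionOuter, List.drop_length, PySem.Set.ofList_nil]
  | succ k ih =>
    intro i S acc hlen hS
    have hi : i < s.length := by omega
    have hget : (s.map (pvMask S)).getD i ' ' = pvMask S s[i] :=
      PySem.List.getD_map_of_lt _ _ _ _ hi
    have hdropcons : s.drop i = s[i] :: s.drop (i + 1) := List.drop_eq_getElem_cons hi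
    have hS' : ∀ c, c ∈ s[i] :: S ↔ c ∈ s.take (i + 1) := by
      intro c
      rw [List.take_succ_eq_append_getElem hi]
      simp only [List.mem_cons, List.mem_append, hS c]
      tauto
    have hdiscard : (PySem.Set.ofList (s.drop (i + 1))).discard s[i]
        = (PySem.Set.ofList (s.drop (i + 1))).filter (fun c => c != s[i]) := rfl
    rw [List.range'_succ]
    simp only [solutionOuter]
    by_cases hza : s[i] ∈ S ∨ s[i] = '0'
    · -- pivot is '0': the inner loop does nothing, the replace does nothing
      have hp : pvMask S s[i] = '0' := by
        unfold pvMask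
        rcases hza with h | h
        · simp [h]
        · simp [h]
      rw [hget, hp, pv_inner_zero]
      simp only [Bool.false_eq_true, if_false, List.map_map, Function.comp_def]
      rw [List.map_congr_left (fun c _ => pv_mask_zero hza c)]
      rw [ih (i + 1) (s[i] :: S) acc (by omega) hS']
      congr 1
      rw [hdropcons, PySem.Set.ofList_cons, hdiscard, List.filter_cons]
      have hhead : (!(decide (s[i] ∈ S)) && pvGood s s[i]) = false := by
        rcases hza with h | h
        · simp [h]
        · simp [pvGood, h]
      rw [hhead]
      simp only [Bool.false_eq_true, if_false]
      exact (pv_filter_tail s S s[i] _).symm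
    · -- pivot is the fresh character s[i]
      push_neg at hza
      obtain ⟨haS, ha0⟩ := hza
      have hmem : s[i] ∈ s := List.getElem_mem hi
      have hnotake : s[i] ∉ s.take i := fun hc => haS ((hS _).mpr hc)
      have hidx : List.idxOf s[i] s = i := pv_idxOf_eq hi rfl hnotake
      have hKpos : 0 < s.count s[i] := List.count_pos_iff.mpr hmem
      have hcount : (s.map (pvMask S)).count s[i] = s.count s[i] := pv_count_mask haS ha0 s
      have hdropcnt : (s.drop i).count s[i] = s.count s[i] := by
        have h0 : (s.take i).count s[i] = 0 := List.count_eq_zero.mpr hnotake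
        have hca : (s.take i ++ s.drop i).count s[i]
            = (s.take i).count s[i] + (s.drop i).count s[i] := List.count_append
        rw [List.take_append_drop] at hca
        omega
      have hsuffix : (s.map (pvMask S)).drop i = (s.drop i).map (pvMask S) :=
        (List.map_drop).symm
      have hsufcnt : ((s.drop i).map (pvMask S)).count s[i] = s.count s[i] := by
        rw [pv_count_mask haS ha0, hdropcnt]
      rw [hget, show pvMask S s[i] = s[i] from if_neg haS]
      rw [hsuffix, pv_inner_spec s[i] ha0 _ _ (by rw [hcount]; exact_mod_cast hKpos)
        (by rw [hcount, hsufcnt])]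
      have htoNat : (((s.map (pvMask S)).count s[i] : Int)).toNat = s.count s[i] := by
        rw [hcount]; exact Int.toNat_natCast _
      rw [htoNat, ← List.map_take, List.all_map]
      rw [show ((fun x => x == s[i]) ∘ pvMask S) = fun c => c == s[i] from
        funext fun c => pv_mask_beq haS ha0 c]
      have hgood : pvGood s s[i] = !(((s.drop i).take (s.count s[i])).all (fun c => c == s[i])) := by
        have hcontig := pv_contig_iff hmem
        rw [hidx] at hcontig
        unfold pvGood
        rw [hidx]
        cases hall : ((s.drop i).take (s.count s[i])).all (fun c => c == s[i]) with
        | true => simpa using fun _ => hcontig.mp hall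
        | false =>
          simp only [Bool.not_false, decide_eq_true_eq]
          exact ⟨ha0, fun hc => by rw [hcontig.mpr hc] at hall; cases hall⟩
      rw [← hgood, List.map_map]
      simp only [Function.comp_def]
      rw [List.map_congr_left (fun c _ => pv_mask_step haS ha0 c)]
      rw [ih (i + 1) (s[i] :: S) _ (by omega) hS']
      rw [hdropcons, PySem.Set.ofList_cons, hdiscard, List.filter_cons]
      have hhead : (!(decide (s[i] ∈ S)) && pvGood s s[i]) = pvGood s s[i] := by
        simp [haS]
      rw [hhead, pv_filter_tail s S s[i]]
      cases hg : pvGood s s[i] with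
      | true => simp
      | false => simp

theorem pv_A_acc (s : List Char) :
    solutionOuter s (List.range s.length) [] = pvOut s := by
  have h := pv_outer_spec s s.length 0 [] [] (by omega) (by simp)
  have hmask : s.map (pvMask []) = s := by
    rw [List.map_congr_left (fun c _ => by simp [pvMask] : ∀ c ∈ s, pvMask [] c = c)]
    exact List.map_id s
  rw [hmask, List.drop_zero, List.nil_append] at h
  rw [List.range_eq_range', h]
  unfold pvOut
  exact List.filter_congr (fun c _ => by simp)

-- enumerate of a snoc
theorem pv_enumerate_append (xs : List Char) (x : Char) : ∀ n : Int,
    PySem.List.enumerate (xs ++ [x]) n = PySem.List.enumerate xs n ++ [((n + xs.length : Int), x)] := by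
  induction xs with
  | nil => intro n; simp [PySem.List.enumerate_nil, PySem.List.enumerate_cons]
  | cons y ys ih =>
    intro n
    simp only [List.cons_append, PySem.List.enumerate_cons, ih (n + 1), List.length_cons]
    have hc : (n + 1 + (ys.length : Int)) = n + (((ys.length : Nat) + 1 : Nat) : Int) := by
      push_cast; ring
    rw [hc]

-- B's folded dict: items are the distinct characters with (first, last, count)
theorem pv_stats_items (s : List Char) :
    ((PySem.List.enumerate s).foldl solutionAltStep PySem.Dict.empty).items
      = (PySem.Set.ofList s).map
          (fun c => (c, ((List.idxOf c s : Int), ((pvLst s c : Int), (s.count c : Int))))) := by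
  induction s using List.reverseRecOn with
  | nil => rfl
  | append_singleton t c ih =>
    rw [pv_enumerate_append, List.foldl_append]
    simp only [List.foldl_cons, List.foldl_nil, zero_add]
    have hkeys : ((PySem.List.enumerate t).foldl solutionAltStep PySem.Dict.empty).keys
        = PySem.Set.ofList t := by
      simp only [PySem.Dict.keys]
      rw [ih, List.map_map]
      rw [List.map_congr_left (fun x _ => rfl :
        ∀ x ∈ PySem.Set.ofList t, ((·.1) ∘ fun c =>
          (c, ((List.idxOf c t : Int), ((pvLst t c : Int), (t.count c : Int))))) x = x)]
      exact List.map_id _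
    have hnodup : ((PySem.List.enumerate t).foldl solutionAltStep PySem.Dict.empty).keys.Nodup := by
      rw [hkeys]; exact PySem.Set.nodup_ofList _
    by_cases hc : c ∈ t
    · have hcof : c ∈ PySem.Set.ofList t := (PySem.Set.mem_ofList _ _).mpr hc
      have hpair : (c, ((List.idxOf c t : Int), ((pvLst t c : Int), (t.count c : Int))))
          ∈ ((PySem.List.enumerate t).foldl solutionAltStep PySem.Dict.empty).items := by
        rw [ih]; exact List.mem_map_of_mem hcof
      have hget := PySem.Dict.get?_of_mem_items _ hpair hnodup
      have hcont : ((PySem.List.enumerate t).foldl solutionAltStep PySem.Dict.empty).contains c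
          = true := (PySem.Dict.contains_iff_mem_keys _ c).mpr (by rw [hkeys]; exact hcof)
      rw [show solutionAltStep ((PySem.List.enumerate t).foldl solutionAltStep PySem.Dict.empty)
            ((t.length : Int), c)
          = ((PySem.List.enumerate t).foldl solutionAltStep PySem.Dict.empty).insert c
            ((List.idxOf c t : Int), ((t.length : Int), ((t.count c : Int) + 1))) from by
        simp only [solutionAltStep, hget]]
      rw [PySem.Dict.items_insert_of_contains _ _ hcont, ih, List.map_map]
      rw [PySem.Set.ofList_append_singleton, PySem.Set.add_of_mem hcof]
      refine List.map_congr_left (fun x hx => ?_)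
      have hxt : x ∈ t := (PySem.Set.mem_ofList _ _).mp hx
      by_cases hxc : x = c
      · subst hxc
        simp only [Function.comp_def, beq_self_eq_true, if_pos]
        rw [List.idxOf_append_of_mem hc, pvLst_append_self]
        have hcnt : (t ++ [x]).count x = t.count x + 1 := by
          rw [List.count_append]; simp
        rw [hcnt]
        push_cast
        rfl
      · have hbeq : (x == c) = false := by simp [hxc]
        simp only [Function.comp_def, hbeq, Bool.false_eq_true, if_false]
        rw [List.idxOf_append_of_mem hxt, pvLst_append_ne _ _ _ hxc]
        have hcnt : (t ++ [c]).count x = t.count x := by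
          rw [List.count_append]; simp [Ne.symm hxc]
        rw [hcnt]
    · have hnof : c ∉ PySem.Set.ofList t := fun hcf => hc ((PySem.Set.mem_ofList _ _).mp hcf)
      have hget : ((PySem.List.enumerate t).foldl solutionAltStep PySem.Dict.empty).get? c
          = none := (PySem.Dict.get?_eq_none_iff_not_mem_keys _ c).mpr (by
            rw [hkeys]; exact hnof)
      have hcont : ((PySem.List.enumerate t).foldl solutionAltStep PySem.Dict.empty).contains c
          = false := by
        cases hb : ((PySem.List.enumerate t).foldl solutionAltStep PySem.Dict.empty).contains c
        · rfl
        · exact absurd ((PySem.Dict.contains_iff_mem_keys _ c).mp hb) (by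
            rw [hkeys]; exact hnof)
      rw [show solutionAltStep ((PySem.List.enumerate t).foldl solutionAltStep PySem.Dict.empty)
            ((t.length : Int), c)
          = ((PySem.List.enumerate t).foldl solutionAltStep PySem.Dict.empty).insert c
            ((t.length : Int), ((t.length : Int), (1 : Int))) from by
        simp only [solutionAltStep, hget]]
      rw [PySem.Dict.items_insert_of_not_contains _ _ hcont, ih]
      rw [PySem.Set.ofList_append_singleton, PySem.Set.add_of_not_mem hnof, List.map_append]
      congr 1
      · refine List.map_congr_left (fun x hx => ?_)
        have hxt : x ∈ t := (PySem.Set.mem_ofList _ _).mp hx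
        have hxc : x ≠ c := fun hh => hc (hh ▸ hxt)
        rw [List.idxOf_append_of_mem hxt, pvLst_append_ne _ _ _ hxc]
        have hcnt : (t ++ [c]).count x = t.count x := by
          rw [List.count_append]; simp [Ne.symm hxc]
        rw [hcnt]
      · simp only [List.map_cons, List.map_nil]
        rw [List.idxOf_append_of_notMem hc, List.idxOf_cons_self, pvLst_append_self]
        have hcnt : (t ++ [c]).count c = 1 := by
          rw [List.count_append, List.count_eq_zero.mpr hc]; simp
        rw [hcnt]
        norm_num

theorem pv_B_list (s : List Char) :
    ((((PySem.List.enumerate s).foldl solutionAltStep PySem.Dict.empty).items.filter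
        (fun q => decide (q.1 ≠ '0' ∧ q.2.2.1 - q.2.1 + 1 ≠ q.2.2.2))).map (·.1)) = pvOut s := by
  rw [pv_stats_items, List.filter_map, List.map_map]
  unfold pvOut
  simp only [Function.comp_def]
  rw [show (fun c => (c, ((List.idxOf c s : Int), ((pvLst s c : Int), (s.count c : Int)))).1)
      = fun (c : Char) => c from rfl]
  rw [List.map_id']
  refine List.filter_congr (fun c hc => ?_)
  have hmem : c ∈ s := (PySem.Set.mem_ofList _ _).mp hc
  have hFL := pv_idxOf_le_pvLst hmem
  unfold pvGood
  refine decide_eq_decide.mpr (and_congr_right fun _ => ?_)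
  constructor <;> intro h1 h2 <;> apply h1 <;> omega

-- ===== VERDICT (by name: the statement is the Claim_ definition above) =====
theorem solution_spec : Claim_equal_solution := by
  intro input_string _
  unfold Spec_solution solution solution_alt
  simp only [pv_A_acc, pv_B_list, PySem.List.foldl_append_singleton, List.nil_append]
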